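-- pv_equiv track=rewrite | github.com/mwill20/AgentLedger | api/services/sessions.py | _scope_allows
-- ===== SOURCE A (Python) =====
-- def _scope_allows(capability_scope: list[str], ontology_tag: str) -> bool:
--     """Return whether one ontology tag is permitted by the agent scope list."""
--     if not capability_scope:
--         return False
--     for scope in capability_scope:
--         if scope == "*":
--             return True
--         normalized_scope = scope[:-2] if scope.endswith(".*") else scope
--         if normalized_scope == ontology_tag:
--             return True
--         if ontology_tag.startswith(normalized_scope + "."):
--             return True
--     return False
-- ===== SOURCE B (Python) =====
-- def _scope_allows(capability_scope: list[str], ontology_tag: str) -> bool: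
--     """Return whether one ontology tag is permitted by the agent scope list."""
--     if not capability_scope:
--         return False
--     if "*" in capability_scope:
--         return True
--     scopes = set()
--     for scope in capability_scope:
--         scopes.add(scope[:-2] if scope.endswith(".*") else scope)
--     if ontology_tag in scopes:
--         return True
--     for i, ch in enumerate(ontology_tag):
--         if ch == "." and ontology_tag[:i] in scopes:
--             return True
--     return False
-- ===== Notes on version B (the rewrite author's own statement) =====
-- stated objective: alternative
-- what changed: Instead of scanning every scope and testing equality/startswith against the tag, B builds a set of normalized scopes once (handling '*' up front) and then iterates over the tag's dot-boundary prefixes, looking each one up in the set; for k scopes and tag length m this is one pass over the scopes plus one pass over the tag.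
import Mathlib
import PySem

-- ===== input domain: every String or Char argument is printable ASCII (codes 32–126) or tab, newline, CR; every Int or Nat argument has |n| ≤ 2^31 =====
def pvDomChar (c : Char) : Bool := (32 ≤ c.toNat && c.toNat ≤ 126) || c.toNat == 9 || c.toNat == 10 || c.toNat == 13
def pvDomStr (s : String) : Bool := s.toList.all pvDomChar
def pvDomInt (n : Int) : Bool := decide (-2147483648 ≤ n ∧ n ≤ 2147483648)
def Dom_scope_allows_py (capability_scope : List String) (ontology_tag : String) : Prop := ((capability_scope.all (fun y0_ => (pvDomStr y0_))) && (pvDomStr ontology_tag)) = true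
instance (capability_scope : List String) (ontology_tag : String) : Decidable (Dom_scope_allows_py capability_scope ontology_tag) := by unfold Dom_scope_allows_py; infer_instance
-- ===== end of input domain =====

-- B replaces A's scope-by-scope startswith scan with a precomputed set of normalized
-- scopes looked up for each dot-boundary prefix of the tag (alternative decomposition).

-- ===== PORT A =====
-- the for-loop over capability_scope, branch order as in A
def scopeLoopA : List String → String → Bool
  | [], _ => false
  | scope :: rest, tag =>
    if scope = "*" then true
    else
      let normalized_scope :=
        if PySem.Str.endswith scope ".*" then PySem.Str.slice scope none (some (-2)) else scope
      if normalized_scope = tag then true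
      else if PySem.Str.startswith tag (normalized_scope ++ ".") then true
      else scopeLoopA rest tag

def scope_allows_py (capability_scope : List String) (ontology_tag : String) : Bool :=
  if capability_scope.isEmpty then false
  else scopeLoopA capability_scope ontology_tag

-- ===== PORT B =====
-- scope[:-2] if scope.endswith(".*") else scope
def pvNorm (scope : String) : String :=
  if PySem.Str.endswith scope ".*" then PySem.Str.slice scope none (some (-2)) else scope

-- the "for i, ch in enumerate(ontology_tag)" loop: i is the running index
def pvDotScan (scopes : PySem.Set String) (tag : String) : Nat → List Char → Bool
  | _, [] => false
  | i, ch :: rest =>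
    if ch = '.' && PySem.Set.contains scopes (PySem.Str.slice tag none (some (i : Int))) then true
    else pvDotScan scopes tag (i + 1) rest

def scope_allows_py_alt (capability_scope : List String) (ontology_tag : String) : Bool :=
  if capability_scope.isEmpty then false
  else if capability_scope.contains "*" then true
  else
    let scopes : PySem.Set String :=
      capability_scope.foldl (fun s scope => PySem.Set.add s (pvNorm scope)) PySem.Set.empty
    if PySem.Set.contains scopes ontology_tag then true
    else pvDotScan scopes ontology_tag 0 ontology_tag.toList

-- ===== PRECONDITION & SPEC =====
def Spec_scope_allows_py (capability_scope : List String) (ontology_tag : String) (out : Bool) : Prop := out = scope_allows_py_alt capability_scope ontology_tag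
instance (capability_scope : List String) (ontology_tag : String) (out : Bool) : Decidable (Spec_scope_allows_py capability_scope ontology_tag out) := by unfold Spec_scope_allows_py; infer_instance

-- ===== CLAIM (what is proved, stated in full; the proofs are below) =====
def Claim_equal_scope_allows_py : Prop := ∀ (capability_scope : List String) (ontology_tag : String), Dom_scope_allows_py capability_scope ontology_tag → Spec_scope_allows_py capability_scope ontology_tag (scope_allows_py capability_scope ontology_tag)

-- ===== LEMMAS AND PROOFS =====

-- a scope matches iff it is "*" or its normalization is the tag or a dot-terminated prefix of it
theorem scopeLoopA_eq_any (l : List String) (tag : String) :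
    scopeLoopA l tag =
      l.any (fun s => decide (s = "*") || decide (pvNorm s = tag) ||
        PySem.Str.startswith tag (pvNorm s ++ ".")) := by
  induction l with
  | nil => rfl
  | cons s rest ih =>
    have hdef : scopeLoopA (s :: rest) tag =
        (if s = "*" then true
         else if pvNorm s = tag then true
         else if PySem.Str.startswith tag (pvNorm s ++ ".") = true then true
         else scopeLoopA rest tag) := rfl
    rw [hdef, List.any_cons, ih]
    by_cases h1 : s = "*" <;> by_cases h2 : pvNorm s = tag <;>
      by_cases h3 : PySem.Str.startswith tag (pvNorm s ++ ".") = true <;>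
      simp [h1, h2]

-- n ++ ['.'] is a prefix of cs iff cs has a '.' at some index j with n = cs.take j
theorem dot_prefix_iff (n cs : List Char) :
    (n ++ ['.']) <+: cs ↔ ∃ j, cs[j]? = some '.' ∧ n = cs.take j := by
  constructor
  · rintro ⟨t, ht⟩
    refine ⟨n.length, ?_, ?_⟩
    · rw [← ht]; simp
    · rw [← ht]; simp [List.take_left']
  · rintro ⟨j, hget, hn⟩
    have hj : j < cs.length := by
      by_contra h
      simp [List.getElem?_eq_none (by omega : cs.length ≤ j)] at hget
    have : n ++ ['.'] = cs.take (j + 1) := by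
      rw [List.take_add_one, hget, hn]; rfl
    rw [this]; exact List.take_prefix _ _

theorem pvDotScan_eq_true_iff (scopes : PySem.Set String) (tag : String) (i : Nat) (cs : List Char) :
    pvDotScan scopes tag i cs = true ↔
      ∃ j, cs[j]? = some '.' ∧
        PySem.Set.contains scopes (PySem.Str.slice tag none (some ((i + j : Nat) : Int))) = true := by
  induction cs generalizing i with
  | nil => simp [pvDotScan]
  | cons c rest ih =>
    simp only [pvDotScan]
    split_ifs with h
    · simp only [Bool.and_eq_true, decide_eq_true_eq] at h
      constructor
      · intro _; exact ⟨0, by simp [h.1], by simpa using h.2⟩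
      · simp
    · rw [ih]
      constructor
      · rintro ⟨j, hg, hc⟩
        exact ⟨j + 1, by simpa using hg, by
          have : i + 1 + j = i + (j + 1) := by omega
          rwa [this] at hc⟩
      · rintro ⟨j, hg, hc⟩
        cases j with
        | zero =>
          exfalso
          simp only [List.getElem?_cons_zero, Option.some.injEq] at hg
          apply h
          simp only [Bool.and_eq_true, decide_eq_true_eq]
          exact ⟨hg, by simpa using hc⟩
        | succ j =>
          refine ⟨j, by simpa using hg, ?_⟩
          have : i + (j + 1) = i + 1 + j := by omega
          rwa [this] at hc

-- membership in the set built by B's first loop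
theorem mem_scopesSet (l : List String) (x : String) :
    (x ∈ l.foldl (fun s scope => PySem.Set.add s (pvNorm scope)) PySem.Set.empty) ↔
      ∃ s ∈ l, x = pvNorm s := by
  have := PySem.Set.mem_foldl_add (l := l) (f := pvNorm) (s := PySem.Set.empty) (y := x)
  simpa [PySem.Set.empty] using this

-- Str.slice with a nonnegative bound is take, at the char-list level
theorem slice_take (tag : String) (j : Nat) :
    (PySem.Str.slice tag none (some (j : Int))).toList = tag.toList.take j := by
  simp [PySem.Str.slice, PySem.Chars.slice_eq_listSlice, PySem.List.slice_to_natCast]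

-- per-scope match condition, B's formulation
theorem match_iff (s tag : String) :
    (pvNorm s = tag ∨ PySem.Str.startswith tag (pvNorm s ++ ".") = true) ↔
      (pvNorm s = tag ∨ ∃ j, tag.toList[j]? = some '.' ∧
        pvNorm s = PySem.Str.slice tag none (some ((j : Nat) : Int))) := by
  apply or_congr_right
  rw [PySem.Str.startswith_eq, PySem.Chars.startswith_iff]
  have hc : (pvNorm s ++ ".").toList = (pvNorm s).toList ++ ['.'] := by
    simp [String.toList_append]
  rw [hc, dot_prefix_iff]
  apply exists_congr
  intro j
  apply and_congr_right
  intro _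
  rw [← String.toList_inj, slice_take]

-- ===== VERDICT (by name: the statement is the Claim_ definition above) =====
theorem scope_allows_py_spec : Claim_equal_scope_allows_py := by
  intro l tag _
  unfold Spec_scope_allows_py scope_allows_py scope_allows_py_alt
  cases he : l.isEmpty with
  | true => simp [he]
  | false =>
    simp only [he, Bool.false_eq_true, if_false]
    cases hstar : l.contains "*" with
    | true =>
      simp only [hstar, if_true]
      rw [scopeLoopA_eq_any]
      rw [List.contains_eq_any_beq, List.any_eq_true] at hstar
      obtain ⟨s, hs, hb⟩ := hstar
      rw [List.any_eq_true]
      exact ⟨s, hs, by simp [(beq_iff_eq.mp hb).symm]⟩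
    | false =>
      simp only [hstar, Bool.false_eq_true, if_false]
      rw [scopeLoopA_eq_any]
      have hnostar : ∀ s ∈ l, ¬ s = "*" := by
        intro s hs he'
        have : l.contains "*" = true := by
          rw [List.contains_eq_any_beq, List.any_eq_true]
          exact ⟨s, hs, by simp [he']⟩
        rw [hstar] at this; exact Bool.false_ne_true this
      by_cases hc : PySem.Set.contains
          (l.foldl (fun s scope => PySem.Set.add s (pvNorm scope)) PySem.Set.empty) tag = true
      · rw [if_pos hc, List.any_eq_true]
        rw [PySem.Set.contains_iff, mem_scopesSet] at hc
        obtain ⟨s, hs, heq⟩ := hc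
        exact ⟨s, hs, by simp [heq.symm]⟩
      · rw [if_neg hc, Bool.eq_iff_iff, List.any_eq_true, pvDotScan_eq_true_iff]
        have hnotag : ∀ s ∈ l, pvNorm s ≠ tag := by
          intro s hs heq
          exact hc (by rw [PySem.Set.contains_iff, mem_scopesSet]; exact ⟨s, hs, heq.symm⟩)
        constructor
        · rintro ⟨s, hs, hb⟩
          simp only [Bool.or_eq_true, decide_eq_true_eq] at hb
          rcases hb with (h | h) | h
          · exact absurd h (hnostar s hs)
          · exact absurd h (hnotag s hs)
          · have hm := (match_iff s tag).mp (Or.inr h)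
            rcases hm with h' | ⟨j, hg, hsl⟩
            · exact absurd h' (hnotag s hs)
            · refine ⟨j, hg, ?_⟩
              have hz : ((0 : Nat) + j : Nat) = j := by omega
              rw [hz, PySem.Set.contains_iff, mem_scopesSet]
              exact ⟨s, hs, hsl.symm⟩
        · rintro ⟨j, hg, hcj⟩
          have hz : ((0 : Nat) + j : Nat) = j := by omega
          rw [hz, PySem.Set.contains_iff, mem_scopesSet] at hcj
          obtain ⟨s, hs, heq⟩ := hcj
          refine ⟨s, hs, ?_⟩
          have hm := (match_iff s tag).mpr (Or.inr ⟨j, hg, heq.symm⟩)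
          simp only [Bool.or_eq_true, decide_eq_true_eq]
          rcases hm with h' | h'
          · exact Or.inl (Or.inr h')
          · exact Or.inr h'
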